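-- pv_equiv track=rewrite | github.com/ZianRaian/HackerRank-Contest-ProjectEuler- | (Solutionn 14) Longest Collatz sequence.py | compute_collatz
-- ===== SOURCE A (Python) =====
-- def compute_collatz(limit):
--     """ Precompute longest Collatz sequences up to `limit`. """
--     dp = [0] * (limit + 1)
--     max_num = [0] * (limit + 1)
--
--     dp[1] = 1  # Base case
--     max_length, max_value = 1, 1
--
--     for i in range(2, limit + 1):
--         n, count = i, 0
--         temp = []
--
--         # Compute chain length
--         while n >= i or dp[n] == 0:
--             temp.append(n)
--             if n % 2 == 0:
--                 n //= 2
--             else: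
--                 n = 3 * n + 1
--             count += 1
--
--         # Use memoization
--         chain_length = count + dp[n]
--         for index, val in enumerate(temp):
--             if val <= limit:
--                 dp[val] = chain_length - index
--
--         # Track max length number
--         if dp[i] >= max_length:
--             max_length = dp[i]
--             max_value = i
--
--         max_num[i] = max_value  # Store the number with longest sequence at `i`
--
--     return max_num
-- ===== SOURCE B (Python) =====
-- def compute_collatz(limit):
--     """ Precompute longest Collatz sequences up to `limit`. """
--     lengths = {1: 1}
--     result = [0] * (limit + 1)
--     best_len, best_num = 1, 1
--     for i in range(2, limit + 1):
--         n, steps = i, 0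
--         while n >= i:
--             n = n // 2 if n % 2 == 0 else 3 * n + 1
--             steps += 1
--         L = steps + lengths[n]
--         lengths[i] = L
--         if L >= best_len:
--             best_len, best_num = L, i
--         result[i] = best_num
--     return result
-- ===== Notes on version B (the rewrite author's own statement) =====
-- stated objective: simpler
-- what changed: B drops A's dp backfill machinery entirely (the temp list, the enumerate backfill pass, and the full-size dp array): since every value below the current i already has a known length, B just follows the orbit until it first drops below i and adds the stored length of that point, keeping lengths in a dict keyed only by processed numbers.
-- outside the precondition, e.g. on compute_collatz(0): A raises IndexError, B returns [0]; on compute_collatz(-1): A raises IndexError, B returns []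
import Mathlib
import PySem

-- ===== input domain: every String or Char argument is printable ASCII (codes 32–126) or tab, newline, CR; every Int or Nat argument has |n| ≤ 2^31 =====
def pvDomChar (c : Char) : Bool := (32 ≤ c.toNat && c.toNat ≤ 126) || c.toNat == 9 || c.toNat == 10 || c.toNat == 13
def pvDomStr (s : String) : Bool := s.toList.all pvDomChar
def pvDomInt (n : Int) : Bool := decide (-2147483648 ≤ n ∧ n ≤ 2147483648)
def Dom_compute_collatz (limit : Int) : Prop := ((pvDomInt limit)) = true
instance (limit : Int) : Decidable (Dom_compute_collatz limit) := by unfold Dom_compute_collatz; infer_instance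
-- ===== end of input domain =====

-- B drops A's temp/backfill machinery: each chain is followed only until it first drops
-- below the current i, whose length is already stored — simpler, same exact results.
-- Both inner while-loops are ported with the same fuel (100000, far above any Collatz
-- chain length reachable on the domain); on fuel exhaustion — where the Python loop
-- would still be running — both ports return [].

-- ===== PORT A =====
def collatzInnerA (i : Int) (dp : List Int) : Nat → Int → Int → List Int → Option (Int × Int × List Int)
  | 0, _, _, _ => none
  | fuel + 1, n, count, temp =>
    -- 'while n >= i or dp[n] == 0': short-circuit means dp[n] is only read when n < i,
    -- where it is in range (1 ≤ n < i ≤ limit), so the total pyGetD is exact there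
    if n ≥ i ∨ PySem.List.pyGetD dp n 0 = 0 then
      collatzInnerA i dp fuel
        (if PySem.Int.mod n 2 = 0 then PySem.Int.floordiv n 2 else 3 * n + 1)
        (count + 1) (temp ++ [n])
    else some (n, count, temp)

def collatzBodyA (limit : Int) (st : Option (List Int × List Int × Int × Int)) (i : Int) :
    Option (List Int × List Int × Int × Int) :=
  match st with
  | none => none
  | some (dp, maxNum, maxLength, maxValue) =>
    match collatzInnerA i dp 100000 i 0 [] with
    | none => none
    | some (n, count, temp) =>
      let chain := count + PySem.List.pyGetD dp n 0
      let dp' := (PySem.List.enumerate temp 0).foldl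
        (fun d p => if p.2 ≤ limit then PySem.List.pySetD d p.2 (chain - p.1) else d) dp
      let dpi := PySem.List.pyGetD dp' i 0
      let maxLength' := if dpi ≥ maxLength then dpi else maxLength
      let maxValue' := if dpi ≥ maxLength then i else maxValue
      some (dp', PySem.List.pySetD maxNum i maxValue', maxLength', maxValue')

def compute_collatz (limit : Int) : List Int :=
  let dp0 := PySem.List.pySetD (List.replicate (limit + 1).toNat (0 : Int)) 1 1  -- dp[1] = 1 (in range iff limit ≥ 1 = Pre_)
  let maxNum0 : List Int := List.replicate (limit + 1).toNat 0
  match (PySem.List.pyRange 2 (limit + 1) 1).foldl (collatzBodyA limit) (some (dp0, maxNum0, 1, 1)) with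
  | none => []
  | some (_, maxNum, _, _) => maxNum

-- ===== PORT B =====
def collatzInnerB (i : Int) : Nat → Int → Int → Option (Int × Int)
  | 0, _, _ => none
  | fuel + 1, n, steps =>
    if n ≥ i then
      collatzInnerB i fuel (if PySem.Int.mod n 2 = 0 then PySem.Int.floordiv n 2 else 3 * n + 1) (steps + 1)
    else some (n, steps)

def collatzBodyB (_limit : Int) (st : Option (PySem.Dict Int Int × Int × Int × List Int)) (i : Int) :
    Option (PySem.Dict Int Int × Int × Int × List Int) :=
  match st with
  | none => none
  | some (lengths, bestLen, bestNum, result) =>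
    match collatzInnerB i 100000 i 0 with
    | none => none
    | some (n, steps) =>
      let L := steps + PySem.Dict.getD lengths n 0   -- lengths[n]: key present for every reachable n (1 ≤ n < i)
      let bestLen' := if L ≥ bestLen then L else bestLen
      let bestNum' := if L ≥ bestLen then i else bestNum
      some (lengths.insert i L, bestLen', bestNum', PySem.List.pySetD result i bestNum')

def compute_collatz_alt (limit : Int) : List Int :=
  match (PySem.List.pyRange 2 (limit + 1) 1).foldl (collatzBodyB limit)
      (some ((PySem.Dict.empty).insert 1 1, 1, 1, List.replicate (limit + 1).toNat 0)) with
  | none => []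
  | some (_, _, _, result) => result

-- ===== PRECONDITION & SPEC =====
-- Pre_ excludes limit ≤ 0, where A raises IndexError (dp[1] = 1 on a list of length ≤ 1).
def Pre_compute_collatz (limit : Int) : Prop := 1 ≤ limit
instance (limit : Int) : Decidable (Pre_compute_collatz limit) := by unfold Pre_compute_collatz; infer_instance
def pvWitness_compute_collatz : Int := 5

def Spec_compute_collatz (limit : Int) (out : List Int) : Prop := out = compute_collatz_alt limit
instance (limit : Int) (out : List Int) : Decidable (Spec_compute_collatz limit out) := by unfold Spec_compute_collatz; infer_instance

-- ===== CLAIM (what is proved, stated in full; the proofs are below) =====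
def Claim_equal_compute_collatz : Prop := ∀ (limit : Int), Dom_compute_collatz limit → Pre_compute_collatz limit → Spec_compute_collatz limit (compute_collatz limit)

-- ===== LEMMAS AND PROOFS =====

-- the Collatz step (proof-side name for the expression both ports inline)
def pvStep (n : Int) : Int := if PySem.Int.mod n 2 = 0 then PySem.Int.floordiv n 2 else 3 * n + 1

-- number of steps to drop below i, with fuel (proof-side characterisation of both loops)
def pvFirstPass (i : Int) : Nat → Int → Option Nat
  | 0, _ => none
  | fuel + 1, n => if n < i then some 0 else (pvFirstPass i fuel (pvStep n)).map Nat.succ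

lemma pvStep_pos {n : Int} (h : 1 ≤ n) : 1 ≤ pvStep n := by
  unfold pvStep
  rw [PySem.Int.mod_eq_emod_of_pos (by omega : (0:Int) < 2), PySem.Int.floordiv_eq_ediv_of_pos (by omega : (0:Int) < 2)]
  split_ifs with h2 <;> omega

lemma pvIter_pos {n : Int} (h : 1 ≤ n) (k : Nat) : 1 ≤ pvStep^[k] n := by
  induction k generalizing n with
  | zero => simpa using h
  | succ m ih => rw [Function.iterate_succ_apply]; exact ih (pvStep_pos h)

lemma innerB_char (i : Int) : ∀ (fuel : Nat) (n steps : Int),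
    collatzInnerB i fuel n steps =
      (pvFirstPass i fuel n).map (fun k => (pvStep^[k] n, steps + (k : Int))) := by
  intro fuel
  induction fuel with
  | zero => intro n steps; simp [collatzInnerB, pvFirstPass]
  | succ f ih =>
    intro n steps
    by_cases hn : n < i
    · simp [collatzInnerB, pvFirstPass, hn, not_le.mpr hn]
    · rw [collatzInnerB, if_pos (not_lt.mp hn),
        show (if PySem.Int.mod n 2 = 0 then PySem.Int.floordiv n 2 else 3 * n + 1) = pvStep n from rfl,
        ih, pvFirstPass, if_neg hn]
      cases pvFirstPass i f (pvStep n) with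
      | none => simp
      | some k =>
        simp only [Option.map_some]
        rw [show pvStep^[k] (pvStep n) = pvStep^[k + 1] n from
          (Function.iterate_succ_apply pvStep k n).symm]
        congr 1
        simp only [Nat.succ_eq_add_one, Prod.mk.injEq, true_and]
        push_cast; ring

lemma pvFirstPass_spec {i : Int} {fuel : Nat} {n : Int} {k : Nat}
    (h : pvFirstPass i fuel n = some k) :
    pvStep^[k] n < i ∧ ∀ j, j < k → i ≤ pvStep^[j] n := by
  induction fuel generalizing n k with
  | zero => simp [pvFirstPass] at h
  | succ f ih =>
    rw [pvFirstPass] at h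
    by_cases hn : n < i
    · rw [if_pos hn] at h
      obtain rfl : k = 0 := by simpa using h.symm
      exact ⟨by simpa using hn, by omega⟩
    · rw [if_neg hn] at h
      obtain ⟨k', hk', rfl⟩ := Option.map_eq_some_iff.mp h
      obtain ⟨h1, h2⟩ := ih hk'
      refine ⟨by rw [show pvStep^[k' + 1] n = pvStep^[k'] (pvStep n) from
        Function.iterate_succ_apply pvStep k' n]; exact h1, ?_⟩
      intro j hj
      cases j with
      | zero => simpa using not_lt.mp hn
      | succ j' =>
        rw [Function.iterate_succ_apply]
        exact h2 j' (by omega)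

lemma innerA_char (i : Int) (dp : List Int)
    (hInv : ∀ v : Int, 1 ≤ v → v < i → PySem.List.pyGetD dp v 0 ≠ 0) :
    ∀ (fuel : Nat) (n count : Int) (temp : List Int), 1 ≤ n →
    collatzInnerA i dp fuel n count temp =
      (pvFirstPass i fuel n).map
        (fun k => (pvStep^[k] n, count + (k : Int),
                   temp ++ (List.range k).map (fun j => pvStep^[j] n))) := by
  intro fuel
  induction fuel with
  | zero => intro n count temp _; simp [collatzInnerA, pvFirstPass]
  | succ f ih =>
    intro n count temp hn1
    by_cases hn : n < i
    · have hne := hInv n hn1 hn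
      rw [collatzInnerA, if_neg (by rintro (h | h) <;> [exact absurd h (not_le.mpr hn); exact hne h]), pvFirstPass, if_pos hn]
      simp
    · rw [collatzInnerA, if_pos (Or.inl (not_lt.mp hn)),
        show (if PySem.Int.mod n 2 = 0 then PySem.Int.floordiv n 2 else 3 * n + 1) = pvStep n from rfl,
        ih (pvStep n) (count + 1) (temp ++ [n]) (pvStep_pos hn1), pvFirstPass, if_neg hn]
      cases pvFirstPass i f (pvStep n) with
      | none => simp
      | some k =>
        simp only [Option.map_some]
        rw [show pvStep^[k] (pvStep n) = pvStep^[k + 1] n from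
          (Function.iterate_succ_apply pvStep k n).symm]
        have hc : count + 1 + (k : Int) = count + ((k + 1 : Nat) : Int) := by push_cast; ring
        have hl : (temp ++ [n]) ++ (List.range k).map (fun j => pvStep^[j] (pvStep n))
            = temp ++ (List.range (k + 1)).map (fun j => pvStep^[j] n) := by
          rw [List.range_succ_eq_map, List.map_cons, List.map_map, List.append_assoc,
            List.singleton_append]
          simp only [Function.iterate_zero, id_eq, List.cons.injEq, List.append_cancel_left_eq]
          refine ⟨trivial, ?_⟩
          apply List.map_congr_left
          intro j _
          simp [Function.comp, Function.iterate_succ_apply]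
        rw [hc, hl]

lemma pvPeriod {j : Nat} {m : Int} (hj : 0 < j) (h : pvStep^[j] m = m) :
    ∀ t : Nat, pvStep^[t] m = pvStep^[t % j] m := by
  intro t
  induction t using Nat.strong_induction_on with
  | _ t ih =>
    by_cases ht : t < j
    · rw [Nat.mod_eq_of_lt ht]
    · have hjt : j ≤ t := not_lt.mp ht
      have h1 : pvStep^[t] m = pvStep^[t - j] m := by
        conv_lhs => rw [show t = (t - j) + j from by omega]
        rw [Function.iterate_add_apply, h]
      rw [h1, ih (t - j) (by omega), Nat.mod_eq_sub_mod hjt]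

lemma pvNoRevisit {i : Int} {fuel k : Nat} (h : pvFirstPass i fuel i = some k)
    {j : Nat} (hj : 0 < j) (hjk : j < k) : pvStep^[j] i ≠ i := by
  intro heq
  obtain ⟨hlt, hge⟩ := pvFirstPass_spec h
  have := pvPeriod hj heq k
  have hmod : k % j < k := lt_trans (Nat.mod_lt k hj) hjk
  have := hge (k % j) hmod
  omega

-- pyGetD at a nonnegative Int index is List.getD
lemma pyGetD_nonneg (xs : List Int) {b : Int} (hb : 0 ≤ b) :
    PySem.List.pyGetD xs b 0 = xs.getD b.toNat 0 := by
  rw [show b = ((b.toNat : Nat) : Int) from by omega, PySem.List.pyGetD_natCast]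
  rw [Int.toNat_natCast]

-- pySetD/pyGetD at distinct nonnegative indices
lemma pyGetD_pySetD_ne {xs : List Int} {a b v : Int} (ha : 0 ≤ a) (hb : 0 ≤ b) (hab : a ≠ b) :
    PySem.List.pyGetD (PySem.List.pySetD xs a v) b 0 = PySem.List.pyGetD xs b 0 := by
  rw [PySem.List.pySetD_of_nonneg xs v ha, pyGetD_nonneg _ hb, pyGetD_nonneg _ hb,
    List.getD_eq_getElem?_getD, List.getD_eq_getElem?_getD, List.getElem?_set,
    if_neg (by omega : ¬ a.toNat = b.toNat)]

lemma pyGetD_pySetD_self {xs : List Int} {a v : Int} (ha : 0 ≤ a) (hlen : a.toNat < xs.length) :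
    PySem.List.pyGetD (PySem.List.pySetD xs a v) a 0 = v := by
  rw [PySem.List.pySetD_of_nonneg xs v ha, pyGetD_nonneg _ ha,
    List.getD_eq_getElem?_getD, List.getElem?_set, if_pos rfl, if_pos hlen]
  rfl

lemma backfill_length (limit chain : Int) :
    ∀ (l : List (Int × Int)) (d : List Int),
    (l.foldl (fun d p => if p.2 ≤ limit then PySem.List.pySetD d p.2 (chain - p.1) else d) d).length
      = d.length := by
  intro l
  induction l with
  | nil => intro d; rfl
  | cons p l ih =>
    intro d
    rw [List.foldl_cons, ih]
    split
    · exact PySem.List.length_pySetD d p.2 (chain - p.1)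
    · rfl

lemma backfill_untouched (limit chain : Int) :
    ∀ (l : List (Int × Int)) (d : List Int) (v : Int), 0 ≤ v →
    (∀ p ∈ l, 0 ≤ p.2 ∧ p.2 ≠ v) →
    PySem.List.pyGetD
      (l.foldl (fun d p => if p.2 ≤ limit then PySem.List.pySetD d p.2 (chain - p.1) else d) d) v 0
      = PySem.List.pyGetD d v 0 := by
  intro l
  induction l with
  | nil => intro d v _ _; rfl
  | cons p l ih =>
    intro d v hv h
    rw [List.foldl_cons, ih _ v hv (fun q hq => h q (List.mem_cons_of_mem p hq))]
    obtain ⟨hp0, hpv⟩ := h p (List.mem_cons_self)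
    split
    · exact pyGetD_pySetD_ne hp0 hv hpv
    · rfl

-- the simulation invariant between A's and B's loop states
def pvRel (limit i : Int)
    (sa : Option (List Int × List Int × Int × Int))
    (sb : Option (PySem.Dict Int Int × Int × Int × List Int)) : Prop :=
  match sa, sb with
  | none, none => True
  | some (dp, maxNum, maxLength, maxValue), some (lengths, bestLen, bestNum, result) =>
      dp.length = (limit + 1).toNat ∧ maxNum = result ∧ maxLength = bestLen ∧ maxValue = bestNum ∧
      ∀ v : Int, 1 ≤ v → v < i →
        PySem.List.pyGetD dp v 0 = PySem.Dict.getD lengths v 0 ∧ 1 ≤ PySem.List.pyGetD dp v 0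
  | _, _ => False

lemma body_sim (limit i : Int) (h2 : 2 ≤ i) (hil : i ≤ limit) (sa sb)
    (h : pvRel limit i sa sb) :
    pvRel limit (i + 1) (collatzBodyA limit sa i) (collatzBodyB limit sb i) := by
  rcases sa with _ | ⟨dp, maxNum, maxLength, maxValue⟩ <;>
    rcases sb with _ | ⟨lengths, bestLen, bestNum, result⟩
  · simp [collatzBodyA, collatzBodyB, pvRel]
  · simp [pvRel] at h
  · simp [pvRel] at h
  · obtain ⟨hlen, hmn, hml, hmv, hInv⟩ := h
    have hInv' : ∀ v : Int, 1 ≤ v → v < i → PySem.List.pyGetD dp v 0 ≠ 0 := by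
      intro v h1 hv
      have := (hInv v h1 hv).2
      omega
    have hA := innerA_char i dp hInv' 100000 i 0 [] (by omega)
    have hB := innerB_char i 100000 i 0
    cases hfp : pvFirstPass i 100000 i with
    | none =>
      rw [hfp] at hA hB
      simp only [Option.map_none] at hA hB
      simp [collatzBodyA, collatzBodyB, hA, hB, pvRel]
    | some k =>
      rw [hfp] at hA hB
      simp only [Option.map_some, List.nil_append] at hA hB
      obtain ⟨hklt, hkge⟩ := pvFirstPass_spec hfp
      obtain ⟨m, rfl⟩ : ∃ m, k = m + 1 := by
        cases k with
        | zero => exact absurd hklt (by simp)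
        | succ m => exact ⟨m, rfl⟩
      have hnf1 : (1 : Int) ≤ pvStep^[m + 1] i := pvIter_pos (by omega) (m + 1)
      have hnfi : pvStep^[m + 1] i < i := hklt
      obtain ⟨hval, hpos⟩ := hInv _ hnf1 hnfi
      -- temp and its decomposition
      have hT0 : (List.range (m + 1)).map (fun j => pvStep^[j] i)
          = i :: (List.range m).map (fun j => pvStep^[j + 1] i) := by
        rw [List.range_succ_eq_map, List.map_cons, List.map_map]
        simp only [Function.iterate_zero, id_eq, List.cons.injEq, true_and]
        apply List.map_congr_left
        intro j _
        simp [Function.comp]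
      have hTmem : ∀ x ∈ (List.range (m + 1)).map (fun j => pvStep^[j] i), i ≤ x := by
        intro x hx
        obtain ⟨j, hj, rfl⟩ := List.mem_map.mp hx
        exact hkge j (by simpa using hj)
      have hRmem : ∀ x ∈ (List.range m).map (fun j => pvStep^[j + 1] i), i ≤ x ∧ x ≠ i := by
        intro x hx
        obtain ⟨j, hj, rfl⟩ := List.mem_map.mp hx
        refine ⟨hkge (j + 1) (by simp at hj; omega), ?_⟩
        exact pvNoRevisit hfp (by omega) (by simp at hj; omega)
      simp only [collatzBodyA, collatzBodyB, hA, hB]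
      -- the backfilled dp
      have hdp'len : ∀ C : Int,
          (((PySem.List.enumerate ((List.range (m + 1)).map (fun j => pvStep^[j] i)) 0).foldl
            (fun d p => if p.2 ≤ limit then PySem.List.pySetD d p.2 (C - p.1) else d) dp)).length
            = dp.length := fun C => backfill_length limit C _ dp
      have hmemT : ∀ C : Int, ∀ p ∈ PySem.List.enumerate ((List.range (m + 1)).map (fun j => pvStep^[j] i)) 0,
          0 ≤ p.2 ∧ i ≤ p.2 := by
        intro C p hp
        rw [PySem.List.mem_enumerate_iff] at hp
        obtain ⟨j, hjlt, rfl⟩ := hp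
        have := hTmem _ (List.getElem_mem hjlt)
        exact ⟨by omega, this⟩
      have hdp'lt : ∀ C v : Int, 0 ≤ v → v < i →
          PySem.List.pyGetD
            ((PySem.List.enumerate ((List.range (m + 1)).map (fun j => pvStep^[j] i)) 0).foldl
              (fun d p => if p.2 ≤ limit then PySem.List.pySetD d p.2 (C - p.1) else d) dp) v 0
            = PySem.List.pyGetD dp v 0 := by
        intro C v hv0 hvi
        refine backfill_untouched limit C _ dp v hv0 ?_
        intro p hp
        obtain ⟨h0, hi⟩ := hmemT C p hp
        exact ⟨h0, by omega⟩
      have hdp'i : ∀ C : Int,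
          PySem.List.pyGetD
            ((PySem.List.enumerate ((List.range (m + 1)).map (fun j => pvStep^[j] i)) 0).foldl
              (fun d p => if p.2 ≤ limit then PySem.List.pySetD d p.2 (C - p.1) else d) dp) i 0
            = C := by
        intro C
        rw [hT0, PySem.List.enumerate_cons, List.foldl_cons]
        simp only [if_pos hil]
        have hstep : ∀ p ∈ PySem.List.enumerate ((List.range m).map (fun j => pvStep^[j + 1] i)) 1,
            0 ≤ p.2 ∧ p.2 ≠ i := by
          intro p hp
          rw [PySem.List.mem_enumerate_iff] at hp
          obtain ⟨j, hjlt, rfl⟩ := hp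
          obtain ⟨hge, hne⟩ := hRmem _ (List.getElem_mem hjlt)
          exact ⟨by omega, hne⟩
        rw [show (0 : Int) + 1 = 1 from by norm_num]
        rw [backfill_untouched limit C _ _ i (by omega) hstep,
          pyGetD_pySetD_self (by omega) (by rw [hlen]; omega)]
        ring
      refine ⟨?_, ?_, ?_, ?_, ?_⟩
      · rw [hdp'len, hlen]
      · rw [hmn, hdp'i, hval, hml, hmv]
      · rw [hdp'i, hval, hml]
      · rw [hdp'i, hval, hml, hmv]
      · intro v h1 hv
        have hC : (1 : Int) ≤ 0 + ((m + 1 : Nat) : Int) + PySem.List.pyGetD dp (pvStep^[m + 1] i) 0 := by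
          push_cast
          omega
        by_cases hvi : v = i
        · subst hvi
          rw [hdp'i, PySem.Dict.getD_insert, if_pos rfl, hval]
          exact ⟨rfl, by push_cast; omega⟩
        · have hvlt : v < i := by omega
          rw [hdp'lt _ v (by omega) hvlt, PySem.Dict.getD_insert, if_neg hvi]
          exact hInv v h1 hvlt

lemma pvRel_mono {limit i i' : Int} (hle : i' ≤ i) {sa sb} (h : pvRel limit i sa sb) :
    pvRel limit i' sa sb := by
  rcases sa with _ | ⟨dp, maxNum, maxLength, maxValue⟩ <;>
    rcases sb with _ | ⟨lengths, bestLen, bestNum, result⟩ <;> simp [pvRel] at h ⊢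
  obtain ⟨h1, h2, h3, h4, h5⟩ := h
  exact ⟨h1, h2, h3, h4, fun v hv1 hv2 => h5 v hv1 (by omega)⟩

lemma fold_sim (limit : Int) : ∀ (N : Nat) (j : Int) sa sb, 2 ≤ j → (limit + 1 - j).toNat = N →
    pvRel limit j sa sb →
    pvRel limit (limit + 1)
      ((PySem.List.pyRange j (limit + 1) 1).foldl (collatzBodyA limit) sa)
      ((PySem.List.pyRange j (limit + 1) 1).foldl (collatzBodyB limit) sb) := by
  intro N
  induction N with
  | zero =>
    intro j sa sb h2 hN h
    rw [PySem.List.pyRange_one_eq_nil (by omega)]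
    exact pvRel_mono (by omega) h
  | succ N ih =>
    intro j sa sb h2 hN h
    rw [PySem.List.pyRange_one_cons (by omega : j < limit + 1), List.foldl_cons, List.foldl_cons]
    exact ih (j + 1) _ _ (by omega) (by omega)
      (body_sim limit j h2 (by omega) sa sb h)

-- ===== VERDICT (by name: the statement is the Claim_ definition above) =====
theorem compute_collatz_spec : Claim_equal_compute_collatz := by
  intro limit _ hpre
  unfold Pre_compute_collatz at hpre
  unfold Spec_compute_collatz compute_collatz compute_collatz_alt
  have h0 : pvRel limit 2
      (some (PySem.List.pySetD (List.replicate (limit + 1).toNat (0 : Int)) 1 1,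
             List.replicate (limit + 1).toNat 0, 1, 1))
      (some ((PySem.Dict.empty).insert 1 1, 1, 1, List.replicate (limit + 1).toNat 0)) := by
    refine ⟨?_, rfl, rfl, rfl, ?_⟩
    · rw [PySem.List.length_pySetD, List.length_replicate]
    · intro v h1 hv
      obtain rfl : v = 1 := by omega
      rw [pyGetD_pySetD_self (by omega) (by rw [List.length_replicate]; omega)]
      constructor
      · rw [PySem.Dict.getD_insert, if_pos rfl]
      · omega
  have hsim := fold_sim limit (limit - 1).toNat 2 _ _ (by omega) (by omega) h0
  dsimp only
  rcases hEA : (PySem.List.pyRange 2 (limit + 1) 1).foldl (collatzBodyA limit)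
      (some (PySem.List.pySetD (List.replicate (limit + 1).toNat (0 : Int)) 1 1,
             List.replicate (limit + 1).toNat 0, 1, 1)) with
    _ | ⟨dp, maxNum, maxLength, maxValue⟩ <;>
  rcases hEB : (PySem.List.pyRange 2 (limit + 1) 1).foldl (collatzBodyB limit)
      (some ((PySem.Dict.empty).insert 1 1, 1, 1, List.replicate (limit + 1).toNat 0)) with
    _ | ⟨lengths, bestLen, bestNum, result⟩ <;>
  rw [hEA, hEB] at hsim <;> simp [pvRel] at hsim
  all_goals first | rfl | exact hsim.2.1
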